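-- pv_equiv track=rewrite | github.com/francisphan/salesforce-opportunities-reporter | send_duplicates_report.py | _find_cross_object_overlaps
-- ===== SOURCE A (Python) =====
-- def _find_cross_object_overlaps(email_sets):
--     """Find emails that appear in 2+ objects.
--
--     email_sets: dict of {object_label: set_of_emails}
--     Returns: dict of {email: [object_labels]}
--     """
--     all_emails = set()
--     for emails in email_sets.values():
--         all_emails |= emails
--
--     overlaps = {}
--     for email in all_emails:
--         present_in = [label for label, emails in email_sets.items() if email in emails]
--         if len(present_in) >= 2:
--             overlaps[email] = present_in
--     return overlaps
-- ===== SOURCE B (Python) =====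
-- def _find_cross_object_overlaps(email_sets):
--     """Find emails that appear in 2+ objects.
--
--     Inverted index: flatten to (email, label) pairs, group labels per email
--     in one pass, then filter emails seen under 2+ labels.
--     """
--     pairs = [(email, label) for label, emails in email_sets.items() for email in emails]
--     index = {}
--     for email, label in pairs:
--         index.setdefault(email, []).append(label)
--     return {email: labels for email, labels in index.items() if len(labels) >= 2}
-- ===== Notes on version B (the rewrite author's own statement) =====
-- stated objective: faster
-- what changed: Replaces A's per-email rescan of every label set (union all emails, then for each email filter all of email_sets) by flattening to (email, label) pairs and building an inverted index email -> labels in one pass, then filtering emails with 2+ labels.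
import Mathlib
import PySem

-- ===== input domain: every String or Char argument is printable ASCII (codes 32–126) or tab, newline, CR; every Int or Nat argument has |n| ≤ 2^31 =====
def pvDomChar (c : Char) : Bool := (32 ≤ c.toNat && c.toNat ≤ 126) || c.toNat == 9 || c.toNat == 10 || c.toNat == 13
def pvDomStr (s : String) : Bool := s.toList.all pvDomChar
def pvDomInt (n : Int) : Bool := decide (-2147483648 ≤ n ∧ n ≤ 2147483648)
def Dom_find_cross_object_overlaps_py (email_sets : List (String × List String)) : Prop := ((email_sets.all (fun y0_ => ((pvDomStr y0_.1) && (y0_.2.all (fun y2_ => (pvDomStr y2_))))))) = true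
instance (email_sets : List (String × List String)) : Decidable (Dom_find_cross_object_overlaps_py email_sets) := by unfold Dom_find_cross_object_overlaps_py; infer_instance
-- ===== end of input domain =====

-- B replaces A's per-email rescan of every label set by a flatten-to-pairs inverted index
-- built in one pass and then filtered (return value only; neither version mutates its input).

-- ===== PORT A =====
-- the comprehension [label for label, emails in email_sets.items() if email in emails]
def pvLabelsIn (email_sets : List (String × List String)) (email : String) : List String :=
  (email_sets.filter (fun p => PySem.Set.contains p.2 email)).map (fun p => p.1)

def find_cross_object_overlaps_py (email_sets : List (String × List String)) : List (String × List String) :=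
  let all_emails : PySem.Set String :=
    email_sets.foldl (fun s p => PySem.Set.union s p.2) PySem.Set.empty
  let overlaps : PySem.Dict String (List String) :=
    all_emails.foldl (fun d email =>
      let present_in := pvLabelsIn email_sets email
      if 2 ≤ present_in.length then d.insert email present_in else d) PySem.Dict.empty
  overlaps.items

-- ===== PORT B =====
def find_cross_object_overlaps_py_alt (email_sets : List (String × List String)) : List (String × List String) :=
  let pairs : List (String × String) :=
    email_sets.flatMap (fun p => p.2.map (fun email => (email, p.1)))
  let index : PySem.Dict String (List String) :=
    pairs.foldl (fun d q => d.modify q.1 [] (fun labels => labels ++ [q.2])) PySem.Dict.empty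
  index.items.filter (fun kv => 2 ≤ kv.2.length)

-- ===== PRECONDITION & SPEC =====
-- In the Python, each value of email_sets is a SET of emails; Pre_ states exactly that the
-- List String standing for each set holds distinct elements (the type convention for sets).
def Pre_find_cross_object_overlaps_py (email_sets : List (String × List String)) : Prop :=
  ∀ p ∈ email_sets, p.2.Nodup
instance (email_sets : List (String × List String)) : Decidable (Pre_find_cross_object_overlaps_py email_sets) := by unfold Pre_find_cross_object_overlaps_py; infer_instance

def pvWitness_find_cross_object_overlaps_py : (List (String × List String)) :=
  [("Opportunities", ["a@x.com", "b@x.com"]), ("Contacts", ["a@x.com"])]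

def Spec_find_cross_object_overlaps_py (email_sets : List (String × List String)) (out : List (String × List String)) : Prop := out = find_cross_object_overlaps_py_alt email_sets
instance (email_sets : List (String × List String)) (out : List (String × List String)) : Decidable (Spec_find_cross_object_overlaps_py email_sets out) := by unfold Spec_find_cross_object_overlaps_py; infer_instance

-- ===== CLAIM (what is proved, stated in full; the proofs are below) =====
def Claim_equal_find_cross_object_overlaps_py : Prop := ∀ (email_sets : List (String × List String)), Dom_find_cross_object_overlaps_py email_sets → Pre_find_cross_object_overlaps_py email_sets → Spec_find_cross_object_overlaps_py email_sets (find_cross_object_overlaps_py email_sets)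

-- ===== LEMMAS AND PROOFS =====

-- A's union loop over the values is set(flatMap of the values), in first-occurrence order.
lemma pvFoldlUnion : ∀ (sets : List (String × List String)) (s : PySem.Set String),
    sets.foldl (fun s p => PySem.Set.union s p.2) s
      = PySem.Set.update s (sets.flatMap (fun p => p.2)) := by
  intro sets
  induction sets with
  | nil => intro s; simp [PySem.Set.update_nil]
  | cons p rest ih =>
    intro s
    simp only [List.foldl_cons, List.flatMap_cons, PySem.Set.update_append, PySem.Set.union]
    exact ih _

-- filtering a duplicate-free list for one element
lemma pvFilterBeqNodup (a : String) :
    ∀ (l : List String), l.Nodup → l.filter (fun x => x == a) = if a ∈ l then [a] else [] := by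
  intro l h
  induction l with
  | nil => simp
  | cons x xs ih =>
    rcases List.nodup_cons.mp h with ⟨hx, hxs⟩
    by_cases hxa : x = a
    · subst hxa
      have hnil : xs.filter (fun y => y == x) = [] := by
        apply List.filter_eq_nil_iff.mpr
        intro b hb
        simp only [beq_iff_eq]
        exact fun h => hx (h ▸ hb)
      simp [hnil]
    · simp [hxa, ih hxs, Ne.symm hxa]

-- per-email label list extracted from B's pair stream = A's comprehension
lemma pvPairsFilter : ∀ (sets : List (String × List String)),
    (∀ p ∈ sets, p.2.Nodup) → ∀ (e : String),
    ((sets.flatMap (fun p => p.2.map (fun email => (email, p.1)))).filter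
        (fun q => q.1 == e)).map (fun q => q.2) = pvLabelsIn sets e := by
  intro sets
  induction sets with
  | nil => intro _ e; simp [pvLabelsIn]
  | cons p rest ih =>
    intro h e
    have hp : p.2.Nodup := h p (by simp)
    have hrest : ∀ q ∈ rest, q.2.Nodup := fun q hq => h q (List.mem_cons_of_mem _ hq)
    simp only [List.flatMap_cons, List.filter_append, List.map_append, ih hrest e,
      List.filter_map, pvLabelsIn, List.filter_cons]
    have hcomp : ((fun q : String × String => q.1 == e) ∘ (fun email => (email, p.1)))
        = fun x => x == e := rfl
    rw [hcomp, pvFilterBeqNodup e p.2 hp]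
    by_cases hm : e ∈ p.2
    · simp [hm]
    · simp [hm]

-- A's dict-building loop over a duplicate-free email list, with all keys fresh
lemma pvAFold (sets : List (String × List String)) :
    ∀ (es : List String) (d : PySem.Dict String (List String)), es.Nodup →
    (∀ e ∈ es, d.contains e = false) →
    (es.foldl (fun d email =>
        let present_in := pvLabelsIn sets email
        if 2 ≤ present_in.length then d.insert email present_in else d) d).items
      = d.items ++ (es.filter (fun e => decide (2 ≤ (pvLabelsIn sets e).length))).map
          (fun e => (e, pvLabelsIn sets e)) := by
  intro es
  induction es with
  | nil => intro d _ _; simp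
  | cons e rest ih =>
    intro d hnd hf
    rcases List.nodup_cons.mp hnd with ⟨he, hrest⟩
    have hfe : d.contains e = false := hf e (by simp)
    by_cases hc : 2 ≤ (pvLabelsIn sets e).length
    · have hstep : (let present_in := pvLabelsIn sets e;
          if 2 ≤ present_in.length then d.insert e present_in else d)
          = d.insert e (pvLabelsIn sets e) := by simp [hc]
      rw [List.foldl_cons, hstep]
      rw [ih (d.insert e (pvLabelsIn sets e)) hrest ?_]
      · rw [PySem.Dict.items_insert_of_not_contains d _ hfe]
        simp [hc]
      · intro e' he'
        rw [PySem.Dict.contains_insert]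
        have hne : e' ≠ e := fun h => he (h ▸ he')
        simp [hne, hf e' (List.mem_cons_of_mem _ he')]
    · have hstep : (let present_in := pvLabelsIn sets e;
          if 2 ≤ present_in.length then d.insert e present_in else d) = d := by simp [hc]
      rw [List.foldl_cons, hstep, ih d hrest (fun e' he' => hf e' (List.mem_cons_of_mem _ he'))]
      simp [hc]

-- ===== VERDICT (by name: the statement is the Claim_ definition above) =====
theorem find_cross_object_overlaps_py_spec : Claim_equal_find_cross_object_overlaps_py := by
  intro sets _dom hpre
  unfold Spec_find_cross_object_overlaps_py
  unfold find_cross_object_overlaps_py find_cross_object_overlaps_py_alt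
  simp only []
  -- names
  set pairs : List (String × String) :=
    sets.flatMap (fun p => p.2.map (fun email => (email, p.1))) with hpairs
  set F : List String := sets.flatMap (fun p => p.2) with hF
  have hmapfst : pairs.map (fun q => q.1) = F := by
    rw [hpairs, hF, List.map_flatMap]
    simp [Function.comp_def]
  -- A side
  rw [pvFoldlUnion sets PySem.Set.empty]
  have hE : PySem.Set.update PySem.Set.empty F = PySem.Set.ofList F :=
    PySem.Set.update_nil_left F
  rw [hE]
  rw [pvAFold sets (PySem.Set.ofList F) PySem.Dict.empty (PySem.Set.nodup_ofList F)
      (fun e _ => PySem.Dict.contains_empty e)]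
  -- B side
  set index : PySem.Dict String (List String) :=
    pairs.foldl (fun d q => d.modify q.1 [] (fun labels => labels ++ [q.2])) PySem.Dict.empty
    with hindex
  have hkeys : index.keys = PySem.Set.ofList F := by
    rw [hindex, PySem.Dict.keys_foldl_modify_key pairs Prod.fst []
      (fun _ q => (fun labels => labels ++ [q.2])) PySem.Dict.empty]
    rw [PySem.Dict.keys_empty, PySem.Set.update_nil_left, hmapfst]
  have hnodup : index.keys.Nodup := by
    rw [hkeys]; exact PySem.Set.nodup_ofList F
  have hgetD : ∀ e, index.getD e [] = pvLabelsIn sets e := by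
    intro e
    rw [hindex, PySem.Dict.getD_foldl_modify_append pairs PySem.Dict.empty e]
    rw [PySem.Dict.getD_empty]
    simpa using pvPairsFilter sets hpre e
  rw [PySem.Dict.items_eq_map_keys index hnodup [], hkeys]
  rw [List.filter_map]
  have hfun : ((fun kv : String × List String => decide (2 ≤ kv.2.length))
      ∘ (fun k => (k, index.getD k []))) = fun e => decide (2 ≤ (pvLabelsIn sets e).length) := by
    funext e; simp [Function.comp, hgetD e]
  rw [hfun]
  have hmapeq : ∀ (l : List String),
      l.map (fun k => (k, index.getD k [])) = l.map (fun k => (k, pvLabelsIn sets k)) :=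
    fun l => List.map_congr_left (fun k _ => by rw [hgetD k])
  rw [hmapeq]
  simp [PySem.Dict.empty]
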